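-- pv_equiv track=rewrite | github.com/birc-gsa-2022/ba-python-Atamarado | src/ba.py | strict_border_array
-- ===== SOURCE A (Python) =====
-- def border_array(x: str) -> list[int]:
--     """
--     Construct the border array for x.
--
--     >>> border_array("aaba")
--     [0, 1, 0, 1]
--     >>> border_array("ississippi")
--     [0, 0, 0, 1, 2, 3, 4, 0, 0, 1]
--     >>> border_array("")
--     []
--     >>> border_array("abaabaa")
--     [0, 0, 1, 1, 2, 3, 4]
--     >>> border_array("abcabdabcabc")
--     [0, 0, 0, 1, 2, 0, 1, 2, 3, 4, 5, 3]
--     """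
--     if x=="":
--         return []
--     border_list = [0 for _ in x]
--     index_match = 0
--     for i, c in enumerate(x[1:]):
--         if c==x[index_match]:
--             index_match += 1
--         else:
--             # See if we have another border inside the main one
--             inner_border = 0
--             start_inner_border = -1
--             j = i+1-index_match+1 # We start looking from the second character of the border
--             while j<i+2:
--                 if x[j] == x[inner_border]:
--                     if inner_border == 0:
--                         start_inner_border = j
--                     inner_border += 1
--                 else:
--                     if inner_border > 0:
--                         j = start_inner_border
--                         inner_border = 0
--                 j += 1
--
--             index_match = inner_border
--
--         border_list[i+1] = index_match
--     return border_list
--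
-- def strict_border_array(x: str) -> list[int]:
--     """
--     Construct the strict border array for x.
--
--     A strict border array is one where the border cannot
--     match on the next character. If b is the length of the
--     longest border for x[:i+1], it means x[:b] == x[i-b:i+1],
--     but for a strict border, it must be the longest border
--     such that x[b] != x[i+1].
--
--     >>> strict_border_array("aaba")
--     [0, 1, 0, 1]
--     >>> strict_border_array("aaaba")
--     [0, 0, 2, 0, 1]
--     >>> strict_border_array("ississippi")
--     [0, 0, 0, 0, 0, 0, 4, 0, 0, 1]
--     >>> strict_border_array("")
--     []
--     >>> strict_border_array("abaabaa")
--     [0, 0, 1, 0, 0, 1, 4]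
--     >>> strict_border_array("abcabdabcabc")
--     [0, 0, 0, 0, 2, 0, 0, 0, 0, 0, 5, 3]
--     """
--     ba = border_array(x)
--     bax = [0 for _ in x]
--
--     for i, bai in enumerate(ba[:len(ba)-1]):
--         if bai == 0:
--             bax[i] = 0
--         elif x[i+1] != x[bai]:
--             bax[i] = bai
--         else:
--             bax[i] = bax[bai-1]
--
--     bax[len(ba)-1] = ba[len(ba)-1]
--     return bax
-- ===== SOURCE B (Python) =====
-- def strict_border_array(x: str) -> list[int]:
--     n = len(x)
--     if n == 0:
--         return []
--     # KMP failure function (border array) in linear time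
--     ba = [0] * n
--     k = 0
--     for i in range(1, n):
--         while k > 0 and x[i] != x[k]:
--             k = ba[k - 1]
--         if x[i] == x[k]:
--             k += 1
--         ba[i] = k
--     # strict post-pass
--     bax = [0] * n
--     for i in range(n - 1):
--         b = ba[i]
--         if b != 0 and x[i + 1] == x[b]:
--             bax[i] = bax[b - 1]
--         else:
--             bax[i] = b
--     bax[n - 1] = ba[n - 1]
--     return bax
-- ===== Notes on version B (the rewrite author's own statement) =====
-- stated objective: faster
-- what changed: Replaces A's quadratic border_array (which on every mismatch rescans the whole current border window with a naive backtracking inner while-loop) by the linear-time KMP failure-function recurrence that follows stored failure links, keeping the same strict post-pass; B also returns [] on the empty string where A raises.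
import Mathlib
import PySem

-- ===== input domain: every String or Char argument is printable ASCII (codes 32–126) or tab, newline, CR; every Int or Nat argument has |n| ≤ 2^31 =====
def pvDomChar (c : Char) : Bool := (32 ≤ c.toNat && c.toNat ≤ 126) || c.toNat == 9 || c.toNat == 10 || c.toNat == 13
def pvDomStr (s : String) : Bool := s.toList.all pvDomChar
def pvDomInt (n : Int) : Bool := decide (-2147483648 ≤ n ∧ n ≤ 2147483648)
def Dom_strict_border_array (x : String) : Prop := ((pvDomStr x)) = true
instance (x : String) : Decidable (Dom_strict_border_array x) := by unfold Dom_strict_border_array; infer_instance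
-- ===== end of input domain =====

-- B replaces A's quadratic mismatch-rescan border_array by the linear KMP failure-function
-- recurrence (same strict post-pass); on "" A raises IndexError while B returns [].

-- ===== PORT A =====
-- A's inner `while j < i+2` rescanning loop (iend = i+2).  `fuel` only makes the
-- recursion total; it is proved sufficient below, Python has no such bound.
-- Python initialises start_inner_border to -1, but it is only read after being
-- assigned (inner_border > 0), so the port carries it as a Nat initialised to 0.
def baInner (l : List Char) (iend : ℕ) : ℕ → ℕ → ℕ → ℕ → ℕ
  | j, ib, sib, 0 => ib
  | j, ib, sib, fuel+1 =>
    if j < iend then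
      if l.getD j ' ' == l.getD ib ' ' then
        baInner l iend (j+1) (ib+1) (if ib = 0 then j else sib) fuel
      else if 0 < ib then
        -- j = start_inner_border; inner_border = 0; j += 1
        baInner l iend (sib+1) 0 sib fuel
      else
        baInner l iend (j+1) 0 sib fuel
    else ib

-- the `for i, c in enumerate(x[1:])` loop of border_array; im = index_match;
-- emits border_list[i+1], border_list[i+2], ...
def baFrom (l : List Char) (i im : ℕ) : List ℕ :=
  if h : i + 1 < l.length then
    let im' := if l.getD (i+1) ' ' == l.getD im ' ' then im + 1
      else baInner l (i+2) (i+2-im) 0 0 ((i+2)*(i+3)+(i+3))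
    im' :: baFrom l (i+1) im'
  else []
termination_by l.length - i

def border_array_port (l : List Char) : List ℕ :=
  if l.isEmpty then [] else 0 :: baFrom l 0 0

-- the `for i, bai in enumerate(ba[:len(ba)-1])` loop plus the final
-- `bax[len(ba)-1] = ba[len(ba)-1]` assignment (reached when i+1 = len(ba)).
def strictPassA (l : List Char) (ba : List ℕ) (i : ℕ) (bax : List ℕ) : List ℕ :=
  if h : i + 1 < ba.length then
    let bai := ba.getD i 0
    let v := if bai = 0 then 0
      else if ¬ (l.getD (i+1) ' ' == l.getD bai ' ') then bai
      else bax.getD (bai - 1) 0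
    strictPassA l ba (i+1) (bax ++ [v])
  else bax ++ [ba.getD i 0]
termination_by ba.length - i

def strict_border_array (x : String) : List Int :=
  let l := x.toList
  let ba := border_array_port l
  -- Python raises IndexError here when ba = [] (x = ""); that input is outside Pre_.
  if ba.isEmpty then [] else (strictPassA l ba 0 []).map (fun n => (n : Int))

-- ===== PORT B =====
-- `while k > 0 and x[i] != x[k]: k = ba[k-1]`; fuel k+1 suffices since k strictly decreases.
def kmpChase (l : List Char) (ba : List ℕ) (c : Char) : ℕ → ℕ → ℕ
  | k, 0 => k
  | k, fuel+1 =>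
    if 0 < k ∧ ¬ (c == l.getD k ' ') then kmpChase l ba c (ba.getD (k-1) 0) fuel else k

-- the `for i in range(1, n)` KMP loop; ba holds the entries written so far.
def kmpFrom (l : List Char) (i k : ℕ) (ba : List ℕ) : List ℕ :=
  if h : i < l.length then
    let c := l.getD i ' '
    let k1 := kmpChase l ba c k (k+1)
    let k2 := if c == l.getD k1 ' ' then k1 + 1 else k1
    k2 :: kmpFrom l (i+1) k2 (ba ++ [k2])
  else []
termination_by l.length - i

-- B's strict post-pass: `for i in range(n-1)` with the two-way branch, then bax[n-1] = ba[n-1].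
def strictPassB (l : List Char) (ba : List ℕ) (i : ℕ) (bax : List ℕ) : List ℕ :=
  if h : i + 1 < ba.length then
    let b := ba.getD i 0
    let v := if b ≠ 0 ∧ l.getD (i+1) ' ' == l.getD b ' ' then bax.getD (b-1) 0 else b
    strictPassB l ba (i+1) (bax ++ [v])
  else bax ++ [ba.getD i 0]
termination_by ba.length - i

def strict_border_array_alt (x : String) : List Int :=
  let l := x.toList
  if l.isEmpty then [] else
    let ba := 0 :: kmpFrom l 1 0 [0]
    (strictPassB l ba 0 []).map (fun n => (n : Int))

-- ===== PRECONDITION & SPEC =====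
-- Pre_ excludes only the empty string, on which A raises IndexError
-- (bax[len(ba)-1] = ba[-1] on an empty list); B returns [] there.
def Pre_strict_border_array (x : String) : Prop := x ≠ ""
instance (x : String) : Decidable (Pre_strict_border_array x) := by
  unfold Pre_strict_border_array; infer_instance

def pvWitness_strict_border_array : String := "abcabdabcabc"

def Spec_strict_border_array (x : String) (out : List Int) : Prop := out = strict_border_array_alt x
instance (x : String) (out : List Int) : Decidable (Spec_strict_border_array x out) := by
  unfold Spec_strict_border_array; infer_instance

-- ===== CLAIM (what is proved, stated in full; the proofs are below) =====
def Claim_equal_strict_border_array : Prop := ∀ (x : String), Dom_strict_border_array x → Pre_strict_border_array x → Spec_strict_border_array x (strict_border_array x)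

-- ===== LEMMAS AND PROOFS =====

-- k is a border of the length-m prefix of l (k = 0 allowed, k < m)
def isBorderB (l : List Char) (m k : ℕ) : Bool :=
  decide (k < m) && (List.range k).all (fun t => l.getD t ' ' == l.getD (m - k + t) ' ')

-- length of the longest proper border of the length-m prefix
def bord (l : List Char) (m : ℕ) : ℕ :=
  Nat.findGreatest (fun k => isBorderB l m k = true) (m - 1)

-- the length-(iend - s) suffix of l's iend-prefix starting at s matches a prefix of l
def Good (l : List Char) (iend s : ℕ) : Prop :=
  ∀ t, t < iend - s → l.getD (s + t) ' ' = l.getD t ' '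

theorem isBorderB_iff (l : List Char) (m k : ℕ) :
    isBorderB l m k = true ↔ k < m ∧ ∀ t < k, l.getD t ' ' = l.getD (m - k + t) ' ' := by
  simp [isBorderB, List.all_eq_true]

theorem bord_lt (l : List Char) (m : ℕ) (hm : 1 ≤ m) : bord l m < m := by
  unfold bord
  have := Nat.findGreatest_le (P := fun k => isBorderB l m k = true) (m - 1)
  omega

theorem bord_isB (l : List Char) (m : ℕ) (hm : 1 ≤ m) : isBorderB l m (bord l m) = true := by
  unfold bord
  have h0 : isBorderB l m 0 = true := by rw [isBorderB_iff]; exact ⟨hm, by omega⟩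
  exact Nat.findGreatest_spec (P := fun k => isBorderB l m k = true) (Nat.zero_le _) h0

theorem bord_le (l : List Char) (m k : ℕ) (h : isBorderB l m k = true) : k ≤ bord l m := by
  unfold bord
  refine Nat.le_findGreatest ?_ h
  have := (isBorderB_iff l m k).1 h
  omega

theorem bord_one (l : List Char) : bord l 1 = 0 := by
  have := bord_lt l 1 le_rfl; omega

theorem isB_ext (l : List Char) (m k : ℕ) :
    isBorderB l (m+1) (k+1) = true ↔
      (isBorderB l m k = true ∧ l.getD m ' ' = l.getD k ' ') := by
  rw [isBorderB_iff, isBorderB_iff]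
  constructor
  · rintro ⟨h1, h2⟩
    have hk : k < m := by omega
    refine ⟨⟨hk, fun t ht => ?_⟩, ?_⟩
    · have := h2 t (by omega)
      have e : m + 1 - (k + 1) + t = m - k + t := by omega
      rwa [e] at this
    · have := h2 k (by omega)
      have e : m + 1 - (k + 1) + k = m := by omega
      rw [e] at this; exact this.symm
  · rintro ⟨⟨hk, h1⟩, h2⟩
    refine ⟨by omega, fun t ht => ?_⟩
    have e : m + 1 - (k + 1) + t = m - k + t := by omega
    rw [e]
    rcases Nat.lt_or_ge t k with h | h
    · exact h1 t h
    · have ht' : t = k := by omega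
      rw [ht']
      have e2 : m - k + k = m := by omega
      rw [e2]; exact h2.symm

theorem isB_nest (l : List Char) (m k k' : ℕ) (hk : isBorderB l m k = true) (hlt : k' < k) :
    (isBorderB l k k' = true ↔ isBorderB l m k' = true) := by
  rw [isBorderB_iff] at hk
  obtain ⟨hkm, hbig⟩ := hk
  rw [isBorderB_iff, isBorderB_iff]
  have key : ∀ t, t < k' → l.getD (k - k' + t) ' ' = l.getD (m - k' + t) ' ' := by
    intro t ht
    have := hbig (k - k' + t) (by omega)
    have e : m - k + (k - k' + t) = m - k' + t := by omega
    rwa [e] at this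
  constructor
  · rintro ⟨_, h⟩
    exact ⟨by omega, fun t ht => (h t ht).trans (key t ht)⟩
  · rintro ⟨_, h⟩
    exact ⟨hlt, fun t ht => (h t ht).trans (key t ht).symm⟩

theorem bord_succ_match (l : List Char) (m : ℕ) (hm : 1 ≤ m)
    (h : l.getD m ' ' = l.getD (bord l m) ' ') : bord l (m+1) = bord l m + 1 := by
  have h1 : isBorderB l (m+1) (bord l m + 1) = true :=
    (isB_ext l m (bord l m)).2 ⟨bord_isB l m hm, h⟩
  have h2 : bord l m + 1 ≤ bord l (m+1) := bord_le _ _ _ h1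
  have h3 : bord l (m+1) ≤ bord l m + 1 := by
    have hb := bord_isB l (m+1) (by omega)
    rcases Nat.eq_zero_or_pos (bord l (m+1)) with h0 | h0
    · omega
    · obtain ⟨c, hc⟩ : ∃ c, bord l (m+1) = c + 1 := ⟨bord l (m+1) - 1, by omega⟩
      rw [hc] at hb
      have := ((isB_ext l m c).1 hb).1
      have := bord_le _ _ _ this
      omega
  omega

theorem baInner_eq (l : List Char) (iend : ℕ) :
    ∀ fuel j ib sib s',
      (iend - (j - ib)) * (iend + 1) + (iend - j) < fuel →
      ib ≤ j → j ≤ iend → (0 < ib → sib = j - ib) →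
      (∀ t < ib, l.getD ((j - ib) + t) ' ' = l.getD t ' ') →
      j - ib ≤ s' → (∀ s'', j - ib ≤ s'' → s'' < s' → ¬ Good l iend s'') →
      Good l iend s' →
      baInner l iend j ib sib fuel = iend - s' := by
  intro fuel
  induction fuel with
  | zero =>
    intro j ib sib s' hfuel
    exact absurd hfuel (Nat.not_lt_zero _)
  | succ fuel ih =>
    intro j ib sib s' hfuel hib hj hsib hpart hlow hnot hgood
    simp only [baInner]
    by_cases hjlt : j < iend
    · rw [if_pos hjlt]
      by_cases hm : l.getD j ' ' == l.getD ib ' '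
      · rw [if_pos hm]
        have hmeq : l.getD j ' ' = l.getD ib ' ' := by simpa using hm
        have e : j + 1 - (ib + 1) = j - ib := by omega
        apply ih
        · rw [e]
          have hμ := hfuel
          omega
        · omega
        · omega
        · intro _
          by_cases h0 : ib = 0
          · simp [h0]
          · rw [if_neg h0, e]; exact hsib (by omega)
        · intro t ht
          rw [e]
          rcases Nat.lt_or_ge t ib with h | h
          · exact hpart t h
          · have ht' : t = ib := by omega
            rw [ht', show j - ib + ib = j from by omega]
            exact hmeq
        · rw [e]; exact hlow
        · rw [e]; exact hnot
        · exact hgood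
      · rw [if_neg hm]
        have hne : l.getD j ' ' ≠ l.getD ib ' ' := by simpa using hm
        have hsnotgood : ¬ Good l iend (j - ib) := by
          intro hg
          have := hg ib (by omega)
          rw [show (j - ib) + ib = j from by omega] at this
          exact hne this
        have hslt : j - ib < s' := by
          rcases Nat.lt_or_ge (j - ib) s' with h | h
          · exact h
          · have heq : j - ib = s' := by omega
            exact absurd (heq ▸ hgood) hsnotgood
        have factor : (iend - (j - ib)) * (iend + 1)
            = (iend - (j - ib + 1)) * (iend + 1) + (iend + 1) := by
          have e1 : iend - (j - ib) = (iend - (j - ib + 1)) + 1 := by omega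
          rw [e1, add_mul, one_mul]
        rw [factor] at hfuel
        by_cases hibpos : 0 < ib
        · rw [if_pos hibpos]
          have hsibe := hsib hibpos
          apply ih
          · rw [hsibe, show j - ib + 1 - 0 = j - ib + 1 from by omega]
            omega
          · omega
          · omega
          · omega
          · intro t ht; omega
          · rw [hsibe]; omega
          · intro s'' h1 h2
            apply hnot s'' (by omega) h2
          · exact hgood
        · rw [if_neg hibpos]
          have hib0 : ib = 0 := by omega
          subst hib0
          apply ih
          · have e2 : j - 0 + 1 = j + 1 := by omega
            rw [e2] at hfuel
            simp only [Nat.sub_zero]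
            omega
          · omega
          · omega
          · omega
          · intro t ht; omega
          · omega
          · intro s'' h1 h2
            apply hnot s'' (by omega) h2
          · exact hgood
    · rw [if_neg hjlt]
      have hje : j = iend := by omega
      have hsgood : Good l iend (j - ib) := by
        intro t ht
        apply hpart
        omega
      have heq : j - ib = s' := by
        rcases Nat.lt_or_ge (j - ib) s' with h | h
        · exact absurd hsgood (hnot _ le_rfl h)
        · omega
      omega

theorem good_iff_isB (l : List Char) (iend s : ℕ) (hs1 : 1 ≤ s) (hs2 : s ≤ iend) :
    Good l iend s ↔ isBorderB l iend (iend - s) = true := by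
  rw [isBorderB_iff]
  constructor
  · intro hg
    refine ⟨by omega, fun t ht => ?_⟩
    have := hg t ht
    rw [show iend - (iend - s) + t = s + t from by omega]
    exact this.symm
  · rintro ⟨_, h⟩
    intro t ht
    have := h t ht
    rw [show iend - (iend - s) + t = s + t from by omega] at this
    exact this.symm

theorem bord_succ_le (l : List Char) (m : ℕ) (hm : 1 ≤ m)
    (hmm : l.getD m ' ' ≠ l.getD (bord l m) ' ') : bord l (m+1) ≤ bord l m := by
  rcases Nat.eq_zero_or_pos (bord l (m+1)) with h0 | h0
  · omega
  · have hb := bord_isB l (m+1) (by omega)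
    obtain ⟨c, hc⟩ : ∃ c, bord l (m+1) = c + 1 := ⟨bord l (m+1) - 1, by omega⟩
    rw [hc] at hb
    obtain ⟨hcb, hcm⟩ := (isB_ext l m c).1 hb
    have hle : c ≤ bord l m := bord_le _ _ _ hcb
    have : c ≠ bord l m := by intro he; rw [he] at hcm; exact hmm hcm
    omega

theorem baInner_bord (l : List Char) (m : ℕ) (hm : 1 ≤ m)
    (hmm : l.getD m ' ' ≠ l.getD (bord l m) ' ') (fuel : ℕ)
    (hfuel : (m+1)*(m+1+1)+(m+1+1) ≤ fuel) :
    baInner l (m+1) (m+1 - bord l m) 0 0 fuel = bord l (m+1) := by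
  have hblt : bord l m < m := bord_lt l m hm
  have hBlt : bord l (m+1) < m + 1 := bord_lt l (m+1) (by omega)
  have hBb : bord l (m+1) ≤ bord l m := bord_succ_le l m hm hmm
  have key := baInner_eq l (m+1) fuel (m+1 - bord l m) 0 0 (m+1 - bord l (m+1))
    (by
      have h1 : (m + 1 - (m + 1 - bord l m - 0)) * (m + 1 + 1) ≤ (m+1) * (m + 1 + 1) :=
        Nat.mul_le_mul_right _ (by omega)
      omega)
    (by omega) (by omega) (by omega) (by omega) (by omega)
    (by
      intro s'' h1 h2 hgod
      have hs1 : 1 ≤ s'' := by omega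
      have hs2 : s'' ≤ m + 1 := by omega
      have := (good_iff_isB l (m+1) s'' hs1 hs2).1 hgod
      have := bord_le _ _ _ this
      omega)
    (by
      rw [good_iff_isB l (m+1) _ (by omega) (by omega),
        show m + 1 - (m + 1 - bord l (m+1)) = bord l (m+1) from by omega]
      exact bord_isB l (m+1) (by omega))
  rw [key]
  omega

theorem baFrom_eq (l : List Char) :
    ∀ N i im, l.length - i ≤ N → im = bord l (i+1) →
      baFrom l i im = (List.range' (i+2) (l.length - (i+1))).map (bord l) := by
  intro N
  induction N with
  | zero =>
    intro i im hN him
    rw [baFrom, dif_neg (by omega)]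
    rw [show l.length - (i+1) = 0 from by omega]
    simp
  | succ N ih =>
    intro i im hN him
    by_cases h : i + 1 < l.length
    · rw [baFrom, dif_pos h]
      have hstep : (if l.getD (i+1) ' ' == l.getD im ' ' then im + 1
          else baInner l (i+2) (i+2-im) 0 0 ((i+2)*(i+3)+(i+3))) = bord l (i+2) := by
        by_cases hc : l.getD (i+1) ' ' == l.getD im ' '
        · rw [if_pos hc]
          have : l.getD (i+1) ' ' = l.getD (bord l (i+1)) ' ' := by
            rw [← him]; simpa using hc
          rw [him, show i + 2 = (i+1)+1 from rfl]
          exact (bord_succ_match l (i+1) (by omega) this).symm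
        · rw [if_neg hc]
          have hne : l.getD (i+1) ' ' ≠ l.getD (bord l (i+1)) ' ' := by
            rw [← him]; simpa using hc
          have := baInner_bord l (i+1) (by omega) hne ((i+2)*(i+3)+(i+3)) (by norm_num)
          rw [him]
          exact this
      simp only [hstep]
      have hlen : l.length - (i+1) = (l.length - (i+2)) + 1 := by omega
      rw [hlen, List.range'_succ, List.map_cons]
      congr 1
      have := ih (i+1) (bord l (i+2)) (by omega) rfl
      rw [this]
    · rw [baFrom, dif_neg h]
      rw [show l.length - (i+1) = 0 from by omega]
      simp

theorem border_array_port_eq (l : List Char) (hl : l ≠ []) :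
    border_array_port l = (List.range' 1 l.length).map (bord l) := by
  have hlen : 1 ≤ l.length := by
    cases l with
    | nil => exact absurd rfl hl
    | cons a t => simp
  rw [border_array_port, if_neg (by simp [List.isEmpty_iff]; exact hl)]
  rw [show l.length = (l.length - 1) + 1 from by omega, List.range'_succ, List.map_cons]
  rw [baFrom_eq l l.length 0 0 (by omega) (bord_one l).symm]
  rw [bord_one]

theorem kmpChase_spec (l : List Char) (i : ℕ) (hi : 1 ≤ i) (ba : List ℕ)
    (hlen : ba.length = i) (hba : ∀ j < i, ba.getD j 0 = bord l (j+1)) :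
    ∀ fuel k, k < fuel →
      isBorderB l i k = true →
      (∀ m, isBorderB l (i+1) m = true → m ≤ k + 1) →
      (isBorderB l i (kmpChase l ba (l.getD i ' ') k fuel) = true ∧
       (∀ m, isBorderB l (i+1) m = true → m ≤ kmpChase l ba (l.getD i ' ') k fuel + 1) ∧
       (kmpChase l ba (l.getD i ' ') k fuel = 0 ∨
        l.getD i ' ' = l.getD (kmpChase l ba (l.getD i ' ') k fuel) ' ')) := by
  intro fuel
  induction fuel with
  | zero => intro k hk; exact absurd hk (Nat.not_lt_zero _)
  | succ fuel ih =>
    intro k hk hk1 hk2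
    simp only [kmpChase]
    by_cases hcond : 0 < k ∧ ¬ (l.getD i ' ' == l.getD k ' ')
    · rw [if_pos hcond]
      obtain ⟨hkpos, hne'⟩ := hcond
      have hne : l.getD i ' ' ≠ l.getD k ' ' := by simpa using hne'
      have hklt : k < i := ((isBorderB_iff l i k).1 hk1).1
      have hget : ba.getD (k-1) 0 = bord l k := by
        have := hba (k-1) (by omega)
        rw [this, show k - 1 + 1 = k from by omega]
      rw [hget]
      have hbk : bord l k < k := bord_lt l k hkpos
      apply ih
      · omega
      · -- bord l k is a border of the i-prefix
        have h1 : isBorderB l k (bord l k) = true := bord_isB l k hkpos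
        exact (isB_nest l i k (bord l k) hk1 hbk).1 h1
      · intro m hm
        rcases Nat.eq_zero_or_pos m with h0 | h0
        · omega
        · obtain ⟨c, hc⟩ : ∃ c, m = c + 1 := ⟨m - 1, by omega⟩
          subst hc
          obtain ⟨hcb, hcm⟩ := (isB_ext l i c).1 hm
          have hci : c ≤ k := by have := hk2 (c+1) hm; omega
          have hcne : c ≠ k := by intro he; rw [he] at hcm; exact hne hcm
          have : isBorderB l k c = true := (isB_nest l i k c hk1 (by omega)).2 hcb
          have := bord_le _ _ _ this
          omega
    · rw [if_neg hcond]
      refine ⟨hk1, hk2, ?_⟩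
      by_cases h0 : k = 0
      · exact Or.inl h0
      · right
        have : l.getD i ' ' == l.getD k ' ' := by
          by_contra hx
          exact hcond ⟨by omega, hx⟩
        simpa using this

theorem kmp_step (l : List Char) (i : ℕ) (hi : 1 ≤ i) (hil : i < l.length) (ba : List ℕ)
    (hlen : ba.length = i) (hba : ∀ j < i, ba.getD j 0 = bord l (j+1)) :
    (if l.getD i ' ' == l.getD (kmpChase l ba (l.getD i ' ') (bord l i) (bord l i + 1)) ' '
      then kmpChase l ba (l.getD i ' ') (bord l i) (bord l i + 1) + 1
      else kmpChase l ba (l.getD i ' ') (bord l i) (bord l i + 1)) = bord l (i+1) := by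
  have hinit1 : isBorderB l i (bord l i) = true := bord_isB l i hi
  have hinit2 : ∀ m, isBorderB l (i+1) m = true → m ≤ bord l i + 1 := by
    intro m hm
    rcases Nat.eq_zero_or_pos m with h0 | h0
    · omega
    · obtain ⟨c, hc⟩ : ∃ c, m = c + 1 := ⟨m - 1, by omega⟩
      subst hc
      have := bord_le _ _ _ ((isB_ext l i c).1 hm).1
      omega
  obtain ⟨h1, h2, h3⟩ := kmpChase_spec l i hi ba hlen hba (bord l i + 1) (bord l i)
    (by omega) hinit1 hinit2
  set k1 := kmpChase l ba (l.getD i ' ') (bord l i) (bord l i + 1) with hk1def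
  by_cases hc : l.getD i ' ' == l.getD k1 ' '
  · rw [if_pos hc]
    have hceq : l.getD i ' ' = l.getD k1 ' ' := by simpa using hc
    have hisb : isBorderB l (i+1) (k1+1) = true := (isB_ext l i k1).2 ⟨h1, hceq⟩
    have hle := bord_le _ _ _ hisb
    have hge := h2 (bord l (i+1)) (bord_isB l (i+1) (by omega))
    omega
  · rw [if_neg hc]
    have hcne : l.getD i ' ' ≠ l.getD k1 ' ' := by simpa using hc
    have hk10 : k1 = 0 := by
      rcases h3 with h | h
      · exact h
      · exact absurd h hcne
    have hB := bord_isB l (i+1) (by omega)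
    have := h2 _ hB
    rcases Nat.eq_zero_or_pos (bord l (i+1)) with h0 | h0
    · omega
    · obtain ⟨c, hc'⟩ : ∃ c, bord l (i+1) = c + 1 := ⟨bord l (i+1) - 1, by omega⟩
      rw [hc'] at hB
      obtain ⟨_, hcm⟩ := (isB_ext l i c).1 hB
      have : c = 0 := by
        have := this
        omega
      rw [this] at hcm
      rw [← hk10] at hcm
      exact absurd hcm hcne

theorem kmpFrom_eq (l : List Char) :
    ∀ N i k ba, l.length - i ≤ N → 1 ≤ i → k = bord l i → ba.length = i →
      (∀ j < i, ba.getD j 0 = bord l (j+1)) →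
      kmpFrom l i k ba = (List.range' (i+1) (l.length - i)).map (bord l) := by
  intro N
  induction N with
  | zero =>
    intro i k ba hN hi hk hlen hba
    rw [kmpFrom, dif_neg (by omega)]
    rw [show l.length - i = 0 from by omega]
    simp
  | succ N ih =>
    intro i k ba hN hi hk hlen hba
    by_cases h : i < l.length
    · rw [kmpFrom, dif_pos h]
      subst hk
      have hstep := kmp_step l i hi h ba hlen hba
      simp only [hstep]
      have hlen' : l.length - i = (l.length - (i+1)) + 1 := by omega
      rw [hlen', List.range'_succ, List.map_cons]
      congr 1
      apply ih (i+1) (bord l (i+1)) (ba ++ [bord l (i+1)]) (by omega) (by omega) rfl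
        (by simp [hlen])
      intro j hj
      rcases Nat.lt_or_ge j i with hji | hji
      · rw [List.getD_append _ _ _ _ (by omega)]
        exact hba j hji
      · have : j = i := by omega
        subst this
        rw [List.getD_eq_getElem?_getD, List.getElem?_append_right (by omega), hlen]
        simp
    · rw [kmpFrom, dif_neg h]
      rw [show l.length - i = 0 from by omega]
      simp

theorem kmp_ba_eq (l : List Char) (hl : l ≠ []) :
    0 :: kmpFrom l 1 0 [0] = border_array_port l := by
  have hlen : 1 ≤ l.length := by
    cases l with
    | nil => exact absurd rfl hl
    | cons a t => simp
  rw [border_array_port_eq l hl]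
  rw [kmpFrom_eq l l.length 1 0 [0] (by omega) le_rfl (bord_one l).symm (by simp)
    (by intro j hj; interval_cases j; simp [bord_one])]
  rw [show l.length = (l.length - 1) + 1 from by omega, List.range'_succ, List.map_cons]
  rw [bord_one, show l.length - 1 + 1 - 1 = l.length - 1 from by omega]

theorem strictPass_eq (l : List Char) (ba : List ℕ) :
    ∀ N i bax, ba.length - i ≤ N → strictPassA l ba i bax = strictPassB l ba i bax := by
  intro N
  induction N with
  | zero =>
    intro i bax hN
    rw [strictPassA, strictPassB, dif_neg (by omega), dif_neg (by omega)]
  | succ N ih =>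
    intro i bax hN
    by_cases h : i + 1 < ba.length
    · rw [strictPassA, strictPassB, dif_pos h, dif_pos h]
      have hv : (if ba.getD i 0 = 0 then 0
            else if ¬ (l.getD (i+1) ' ' == l.getD (ba.getD i 0) ' ') then ba.getD i 0
            else bax.getD (ba.getD i 0 - 1) 0)
          = (if ba.getD i 0 ≠ 0 ∧ l.getD (i+1) ' ' == l.getD (ba.getD i 0) ' '
            then bax.getD (ba.getD i 0 - 1) 0 else ba.getD i 0) := by
        by_cases h0 : ba.getD i 0 = 0
        · rw [if_pos h0, if_neg (fun hx => hx.1 h0), h0]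
        · by_cases hc : (l.getD (i+1) ' ' == l.getD (ba.getD i 0) ' ') = true
          · rw [if_neg h0, if_neg (fun hx => hx hc), if_pos ⟨h0, hc⟩]
          · rw [if_neg h0, if_pos (fun hx => hc hx), if_neg (fun hx => hc hx.2)]
      show strictPassA l ba (i+1) (bax ++ [_]) = strictPassB l ba (i+1) (bax ++ [_])
      rw [hv]
      exact ih (i+1) _ (by omega)
    · rw [strictPassA, strictPassB, dif_neg h, dif_neg h]

theorem main_eq (x : String) (hx : x ≠ "") :
    strict_border_array x = strict_border_array_alt x := by
  have hl : x.toList ≠ [] := by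
    intro h
    apply hx
    have := congrArg String.ofList h
    rwa [String.ofList_toList] at this
  simp only [strict_border_array, strict_border_array_alt]
  rw [← kmp_ba_eq x.toList hl]
  rw [strictPass_eq x.toList _ ((0 :: kmpFrom x.toList 1 0 [0]).length) 0 [] (by omega)]
  simp [List.isEmpty_iff, hl]
-- ===== VERDICT (by name: the statement is the Claim_ definition above) =====
theorem strict_border_array_spec : Claim_equal_strict_border_array := by
  intro x _ hpre
  exact main_eq x hpre
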